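-- pv_equiv track=rewrite | github.com/jenul-ferdinand/fit2004 | wk04/prob5.py | k_partition_binary_search
-- ===== SOURCE A (Python) =====
-- from typing import List, TypeVar
-- import bisect
--
-- T = TypeVar('T')
--
-- def k_partition_binary_search(A: List[T], pivots: List[T]) -> List[T]:
--     """
--     Partition a list A into k+1 regions defined by k pivot values in
--     O(k log k + n log k) time by sorting pivots once and then using binary
--     search per element.
--
--     """
--     # 1. Sort the pivots
--     pivots = sorted(pivots)
--
--     # 2. Create k+1 buckets
--     buckets = [[] for _ in range(len(pivots) + 1)]
--
--     # 3. Assigne each element of A to the correct bucket via bisect_left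
--     for x in A:
--         idx = bisect.bisect_left(pivots, x)
--         buckets[idx].append(x)
--
--
--     # 4. Flatten buckets into one list
--     result = []
--     for b in buckets:
--         result.extend(b)
--     return result
-- ===== SOURCE B (Python) =====
-- from typing import List, TypeVar
--
-- T = TypeVar('T')
--
-- def k_partition_binary_search(A: List[T], pivots: List[T]) -> List[T]:
--     # Sequential stable partition: sweep the sorted pivots, peeling off the
--     # elements of each region in original order; no buckets, no binary search.
--     out = []
--     rest = list(A)
--     for p in sorted(pivots):
--         out.extend(x for x in rest if x <= p)
--         rest = [x for x in rest if x > p]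
--     out.extend(rest)
--     return out
-- ===== Notes on version B (the rewrite author's own statement) =====
-- stated objective: simpler
-- what changed: Replaces the bucket array plus per-element bisect_left with a sequential stable-partition sweep: for each sorted pivot, peel off the elements <= pivot in original order and keep partitioning the rest (no buckets, no binary search).
import Mathlib
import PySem

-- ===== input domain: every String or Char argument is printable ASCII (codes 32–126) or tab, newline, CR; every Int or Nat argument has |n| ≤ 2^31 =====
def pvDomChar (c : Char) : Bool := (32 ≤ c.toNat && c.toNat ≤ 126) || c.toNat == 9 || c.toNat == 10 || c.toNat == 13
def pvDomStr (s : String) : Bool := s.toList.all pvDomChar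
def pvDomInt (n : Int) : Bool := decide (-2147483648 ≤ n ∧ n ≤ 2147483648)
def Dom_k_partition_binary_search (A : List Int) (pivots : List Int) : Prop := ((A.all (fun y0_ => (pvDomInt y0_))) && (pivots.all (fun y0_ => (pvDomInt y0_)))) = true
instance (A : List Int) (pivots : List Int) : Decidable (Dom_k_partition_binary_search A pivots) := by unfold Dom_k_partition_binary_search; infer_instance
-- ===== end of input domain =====

-- B replaces the bucket array + per-element binary search with a sequential stable
-- partition sweep over the sorted pivots (objective: simpler).

-- ===== PORT A =====
-- pivots = sorted(pivots); buckets = [[] for _ in range(len(pivots)+1)];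
-- for x in A: buckets[bisect_left(pivots, x)].append(x); then flatten with extend.
def k_partition_binary_search (A : List Int) (pivots : List Int) : List Int :=
  let pivots' := PySem.List.sorted pivots (fun x => x) false
  let buckets : List (List Int) := List.replicate (pivots'.length + 1) []
  let buckets := A.foldl (fun bs x => bs.modify (PySem.List.bisectLeft pivots' x) (· ++ [x])) buckets
  buckets.foldl (fun r b => r ++ b) []

-- ===== PORT B =====
-- out, rest = [], A; for p in sorted(pivots): out += [x in rest if x <= p]; rest = [x in rest if x > p]; out += rest
def k_partition_binary_search_alt (A : List Int) (pivots : List Int) : List Int :=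
  let s := (PySem.List.sorted pivots (fun x => x) false).foldl
    (fun (s : List Int × List Int) p => (s.1 ++ s.2.filter (fun x => x ≤ p), s.2.filter (fun x => p < x)))
    ([], A)
  s.1 ++ s.2

-- ===== PRECONDITION & SPEC =====
def Spec_k_partition_binary_search (A : List Int) (pivots : List Int) (out : List Int) : Prop := out = k_partition_binary_search_alt A pivots
instance (A : List Int) (pivots : List Int) (out : List Int) : Decidable (Spec_k_partition_binary_search A pivots out) := by unfold Spec_k_partition_binary_search; infer_instance

-- ===== CLAIM (what is proved, stated in full; the proofs are below) =====
def Claim_equal_k_partition_binary_search : Prop := ∀ (A : List Int) (pivots : List Int), Dom_k_partition_binary_search A pivots → Spec_k_partition_binary_search A pivots (k_partition_binary_search A pivots)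

-- ===== LEMMAS AND PROOFS =====

-- the common normal form: region j of P, in original order
def pvRegions (P : List Int) (A : List Int) : List (List Int) :=
  (List.range (P.length + 1)).map (fun j => A.filter (fun x => PySem.List.bisectLeft P x == j))

theorem pv_bL_unique (xs : List Int) (x : Int) (h : xs.Pairwise (· ≤ ·)) (n : Nat)
    (hn : n ≤ xs.length)
    (hlt : ∀ (j : Nat) (hj : j < xs.length), j < n → xs[j] < x)
    (hge : ∀ (j : Nat) (hj : j < xs.length), n ≤ j → x ≤ xs[j]) :
    PySem.List.bisectLeft xs x = n := by
  obtain ⟨hm, hm1, hm2⟩ := PySem.List.bisectLeft_spec xs x h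
  set m := PySem.List.bisectLeft xs x with hmdef
  rcases lt_trichotomy m n with hc | hc | hc
  · have hmlen : m < xs.length := lt_of_lt_of_le hc hn
    have := hlt m hmlen hc
    have := hm2 m hmlen le_rfl
    omega
  · exact hc
  · have hnlen : n < xs.length := lt_of_lt_of_le hc hm
    have := hm1 n hnlen hc
    have := hge n hnlen le_rfl
    omega

theorem pv_bL_cons (p : Int) (ps : List Int) (x : Int) (h : (p :: ps).Pairwise (· ≤ ·)) :
    PySem.List.bisectLeft (p :: ps) x =
      if x ≤ p then 0 else PySem.List.bisectLeft ps x + 1 := by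
  rcases List.pairwise_cons.mp h with ⟨hp, hps⟩
  split_ifs with hx
  · apply pv_bL_unique _ _ h 0 (by simp)
    · intro j hj hj0; omega
    · intro j hj _
      match j with
      | 0 => simpa using hx
      | j + 1 =>
        have hjlen : j < ps.length := by simpa using hj
        have := hp ps[j] (List.getElem_mem hjlen)
        simp only [List.getElem_cons_succ]
        omega
  · obtain ⟨hm, hm1, hm2⟩ := PySem.List.bisectLeft_spec ps x hps
    apply pv_bL_unique _ _ h (PySem.List.bisectLeft ps x + 1) (by simpa using hm)
    · intro j hj hjlt
      match j with
      | 0 => simpa using lt_of_not_ge (fun hle => hx hle)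
      | j + 1 =>
        simp only [List.getElem_cons_succ]
        exact hm1 j (by simpa using hj) (by omega)
    · intro j hj hjge
      match j with
      | 0 => omega
      | j + 1 =>
        simp only [List.getElem_cons_succ]
        exact hm2 j (by simpa using hj) (by omega)

-- B-side: the sweep produces the concatenated regions
theorem pv_seq_eq_regions (P : List Int) (h : P.Pairwise (· ≤ ·)) :
    ∀ (A out : List Int),
      (P.foldl (fun (s : List Int × List Int) p =>
          (s.1 ++ s.2.filter (fun x => x ≤ p), s.2.filter (fun x => p < x))) (out, A)).1
        ++ (P.foldl (fun (s : List Int × List Int) p =>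
          (s.1 ++ s.2.filter (fun x => x ≤ p), s.2.filter (fun x => p < x))) (out, A)).2
      = out ++ (pvRegions P A).flatten := by
  induction P with
  | nil =>
    intro A out
    simp only [List.foldl_nil]
    have hA : (pvRegions [] A).flatten = A := by
      have h1 : pvRegions [] A = [A] := by
        simp [pvRegions]
      rw [h1]; simp
    rw [hA]
  | cons p ps ih =>
    intro A out
    rcases List.pairwise_cons.mp h with ⟨hp, hps⟩
    simp only [List.foldl_cons]
    rw [ih hps (A.filter (fun x => p < x)) (out ++ A.filter (fun x => x ≤ p))]
    have h0 : A.filter (fun x => PySem.List.bisectLeft (p :: ps) x == 0)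
        = A.filter (fun x => x ≤ p) := by
      apply List.filter_congr
      intro x _
      rw [pv_bL_cons p ps x h]
      split_ifs with hx <;> simp [hx]
    have hsucc : ∀ j : Nat,
        A.filter (fun x => PySem.List.bisectLeft (p :: ps) x == j + 1)
          = (A.filter (fun x => p < x)).filter (fun x => PySem.List.bisectLeft ps x == j) := by
      intro j
      rw [List.filter_filter]
      apply List.filter_congr
      intro x _
      rw [pv_bL_cons p ps x h]
      split_ifs with hx
      · simp [not_lt.mpr hx]
      · simp [lt_of_not_ge hx]
    have hreg : (pvRegions (p :: ps) A).flatten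
        = A.filter (fun x => x ≤ p) ++ (pvRegions ps (A.filter (fun x => p < x))).flatten := by
      unfold pvRegions
      simp only [List.length_cons]
      rw [List.range_succ_eq_map]
      simp only [List.map_cons, List.map_map, List.flatten_cons, h0]
      congr 1
      congr 1
      apply List.map_congr_left
      intro j _
      simpa using hsucc j
    rw [hreg, List.append_assoc]

-- A-side: pointwise characterisation of the bucket fold
theorem pv_buckets_get (P : List Int) (A : List Int) :
    ∀ (bs : List (List Int)),
      (A.foldl (fun bs x => bs.modify (PySem.List.bisectLeft P x) (· ++ [x])) bs).length = bs.length ∧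
      ∀ (j : Nat) (hj : j < bs.length) (hj' : j < (A.foldl (fun bs x => bs.modify (PySem.List.bisectLeft P x) (· ++ [x])) bs).length),
        (A.foldl (fun bs x => bs.modify (PySem.List.bisectLeft P x) (· ++ [x])) bs)[j]
          = bs[j] ++ A.filter (fun x => PySem.List.bisectLeft P x == j) := by
  induction A with
  | nil => intro bs; simp
  | cons x A ih =>
    intro bs
    simp only [List.foldl_cons]
    obtain ⟨hlen, hget⟩ := ih (bs.modify (PySem.List.bisectLeft P x) (· ++ [x]))
    constructor
    · simp [hlen]
    · intro j hj hj'
      have hjm : j < (bs.modify (PySem.List.bisectLeft P x) (· ++ [x])).length := by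
        simpa using hj
      rw [hget j hjm hj', List.getElem_modify]
      by_cases hx : PySem.List.bisectLeft P x = j
      · simp [hx]
      · simp [hx]

theorem pv_portA_eq_regions (P : List Int) (A : List Int) :
    (A.foldl (fun bs x => bs.modify (PySem.List.bisectLeft P x) (· ++ [x]))
        (List.replicate (P.length + 1) [])).foldl (fun r b => r ++ b) []
      = (pvRegions P A).flatten := by
  obtain ⟨hlen, hget⟩ := pv_buckets_get P A (List.replicate (P.length + 1) [])
  have hbs : (A.foldl (fun bs x => bs.modify (PySem.List.bisectLeft P x) (· ++ [x]))
      (List.replicate (P.length + 1) [])) = pvRegions P A := by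
    apply List.ext_getElem
    · simp [hlen, pvRegions]
    · intro j hj hj'
      have hj2 : j < (List.replicate (P.length + 1) ([] : List Int)).length := by
        rw [← hlen]; exact hj
      rw [hget j hj2 hj]
      simp [pvRegions]
  rw [hbs, PySem.List.foldl_append_eq_flatten]
  simp

-- ===== VERDICT (by name: the statement is the Claim_ definition above) =====
theorem k_partition_binary_search_spec : Claim_equal_k_partition_binary_search := by
  intro A pivots _
  unfold Spec_k_partition_binary_search k_partition_binary_search k_partition_binary_search_alt
  have hsorted : (PySem.List.sorted pivots (fun x => x) false).Pairwise (· ≤ ·) :=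
    PySem.List.sorted_pairwise pivots (fun x => x)
  rw [pv_portA_eq_regions, pv_seq_eq_regions _ hsorted A []]
  simp
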